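-- pv_equiv track=rewrite | github.com/SamuelMulder/oxide | modules/extractors_dev/pe_parse/parse_pe.py | rva_to_offset
-- ===== SOURCE A (Python) =====
-- def rva_to_offset(rva, sections, image_base=0):
--     if not sections:
--         return None
--     for s in sections:
--         v_add = sections[s]["virtual_address"]
--         v_size = sections[s]["virtual_size"]
--         if rva >= v_add and rva < v_add + v_size:
--             f_add = sections[s]["pointer_to_raw_data"] + rva - v_add
--             return f_add
--     if image_base and rva > image_base:
--         return rva_to_offset(rva-image_base, sections, image_base=0)
--     return None
-- ===== SOURCE B (Python) =====
-- def rva_to_offset(rva, sections, image_base=0):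
--     # Single pass: check the raw rva and the image_base-adjusted rva in the same
--     # scan, keeping the first adjusted match as a fallback.
--     adj = rva - image_base if image_base and rva > image_base else None
--     fallback = None
--     for sec in sections.values():
--         v_add = sec["virtual_address"]
--         v_size = sec["virtual_size"]
--         if v_add <= rva < v_add + v_size:
--             return sec["pointer_to_raw_data"] + rva - v_add
--         if fallback is None and adj is not None and v_add <= adj < v_add + v_size:
--             fallback = sec["pointer_to_raw_data"] + adj - v_add
--     return fallback
-- ===== Notes on version B (the rewrite author's own statement) =====
-- stated objective: alternative
-- what changed: Replaces A's two-phase scheme (scan all sections for rva, then recurse once with rva-image_base) by a single pass that checks both the raw and the image_base-adjusted rva in the same scan, keeping the first adjusted match as a fallback.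
import Mathlib
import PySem

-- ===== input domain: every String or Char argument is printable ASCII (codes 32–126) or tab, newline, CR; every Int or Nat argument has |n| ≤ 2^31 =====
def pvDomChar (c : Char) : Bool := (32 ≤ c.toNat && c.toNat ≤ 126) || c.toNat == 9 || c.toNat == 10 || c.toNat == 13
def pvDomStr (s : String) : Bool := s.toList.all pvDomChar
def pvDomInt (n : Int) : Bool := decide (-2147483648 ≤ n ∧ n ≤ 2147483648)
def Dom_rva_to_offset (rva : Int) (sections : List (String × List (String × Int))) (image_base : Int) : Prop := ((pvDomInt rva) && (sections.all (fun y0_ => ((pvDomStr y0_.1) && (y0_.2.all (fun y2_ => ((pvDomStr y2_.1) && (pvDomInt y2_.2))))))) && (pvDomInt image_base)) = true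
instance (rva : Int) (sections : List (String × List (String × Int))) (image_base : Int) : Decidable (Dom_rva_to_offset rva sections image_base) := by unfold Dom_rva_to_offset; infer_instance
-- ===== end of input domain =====

-- B replaces A's two-phase lookup (full scan for rva, then one recursive retry with
-- rva-image_base) by a single scan that tests both values at once, keeping the first
-- adjusted match as a fallback; same cost, one pass.

-- ===== PORT A =====
-- Python dict lookup d[k] on the association-list model: first match, none = KeyError.
def pyGetKey {α : Type} (l : List (String × α)) (k : String) : Option α :=
  match l with
  | [] => none
  | (k', v) :: rest => if k' == k then some v else pyGetKey rest k

-- the 'for s in sections' loop of A; none also encodes a KeyError (excluded by Pre_).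
def pyALoop (rva : Int) (sections : List (String × List (String × Int))) :
    List String → Option Int
  | [] => none
  | s :: rest =>
    match pyGetKey sections s with
    | none => none  -- KeyError on sections[s]; outside Pre_
    | some sec =>
      match pyGetKey sec "virtual_address", pyGetKey sec "virtual_size" with
      | some v_add, some v_size =>
        if rva ≥ v_add ∧ rva < v_add + v_size then
          match pyGetKey sec "pointer_to_raw_data" with
          | some p => some (p + rva - v_add)
          | none => none  -- KeyError; outside Pre_
        else pyALoop rva sections rest
      | _, _ => none  -- KeyError; outside Pre_

def rva_to_offset (rva : Int) (sections : List (String × List (String × Int))) (image_base : Int) : Option Int :=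
  if sections = [] then none
  else
    match pyALoop rva sections (sections.map Prod.fst) with
    | some f_add => some f_add
    | none =>
      if h : image_base ≠ 0 ∧ rva > image_base then
        rva_to_offset (rva - image_base) sections 0
      else none
termination_by image_base.natAbs
decreasing_by exact Int.natAbs_pos.mpr h.1

-- ===== PORT B =====
-- B's single for-loop over sections.values(), carrying the fallback.
def pyBLoop (rva : Int) (adj : Option Int) (fallback : Option Int) :
    List (String × List (String × Int)) → Option Int
  | [] => fallback
  | (_, sec) :: rest =>
    match pyGetKey sec "virtual_address", pyGetKey sec "virtual_size" with
    | some v_add, some v_size =>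
      if v_add ≤ rva ∧ rva < v_add + v_size then
        match pyGetKey sec "pointer_to_raw_data" with
        | some p => some (p + rva - v_add)
        | none => none  -- KeyError; outside Pre_
      else
        match fallback, adj with
        | none, some a =>
          if v_add ≤ a ∧ a < v_add + v_size then
            match pyGetKey sec "pointer_to_raw_data" with
            | some p => pyBLoop rva adj (some (p + a - v_add)) rest
            | none => none  -- KeyError; outside Pre_
          else pyBLoop rva adj none rest
        | fb, _ => pyBLoop rva adj fb rest
    | _, _ => none  -- KeyError; outside Pre_

def rva_to_offset_alt (rva : Int) (sections : List (String × List (String × Int))) (image_base : Int) : Option Int :=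
  let adj : Option Int := if image_base ≠ 0 ∧ rva > image_base then some (rva - image_base) else none
  pyBLoop rva adj none sections

-- ===== PRECONDITION & SPEC =====
-- every inner section dict has the three integer fields A reads
def secOK (sec : List (String × Int)) : Prop :=
  "virtual_address" ∈ sec.map Prod.fst ∧ "virtual_size" ∈ sec.map Prod.fst ∧
    "pointer_to_raw_data" ∈ sec.map Prod.fst

-- Pre_ excludes (a) section dicts missing one of the three fields, on which the Pythons
-- raise KeyError (A can still return when a later section lacks fields the scan never
-- reads; B's one-pass reads them earlier, so such inputs are excluded rather than
-- matched), and (b) association lists with duplicate keys, which do not arise from a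
-- Python dict.
def Pre_rva_to_offset (rva : Int) (sections : List (String × List (String × Int))) (image_base : Int) : Prop :=
  (sections.map Prod.fst).Nodup ∧ ∀ p ∈ sections, (p.2.map Prod.fst).Nodup ∧ secOK p.2
instance (rva : Int) (sections : List (String × List (String × Int))) (image_base : Int) : Decidable (Pre_rva_to_offset rva sections image_base) := by unfold Pre_rva_to_offset secOK; infer_instance

def pvWitness_rva_to_offset : Int × (List (String × List (String × Int))) × Int :=
  (5, [("a", [("virtual_address", 0), ("virtual_size", 10), ("pointer_to_raw_data", 100)])], 0)

def Spec_rva_to_offset (rva : Int) (sections : List (String × List (String × Int))) (image_base : Int) (out : Option Int) : Prop := out = rva_to_offset_alt rva sections image_base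
instance (rva : Int) (sections : List (String × List (String × Int))) (image_base : Int) (out : Option Int) : Decidable (Spec_rva_to_offset rva sections image_base out) := by unfold Spec_rva_to_offset; infer_instance

-- ===== CLAIM (what is proved, stated in full; the proofs are below) =====
def Claim_equal_rva_to_offset : Prop := ∀ (rva : Int) (sections : List (String × List (String × Int))) (image_base : Int), Dom_rva_to_offset rva sections image_base → Pre_rva_to_offset rva sections image_base → Spec_rva_to_offset rva sections image_base (rva_to_offset rva sections image_base)

-- ===== LEMMAS AND PROOFS =====

-- first section of l containing x, as one function of the value looked up
def scanSec (x : Int) : List (String × List (String × Int)) → Option Int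
  | [] => none
  | (_, sec) :: rest =>
    match pyGetKey sec "virtual_address", pyGetKey sec "virtual_size" with
    | some v_add, some v_size =>
      if v_add ≤ x ∧ x < v_add + v_size then
        (pyGetKey sec "pointer_to_raw_data").map (fun p => p + x - v_add)
      else scanSec x rest
    | _, _ => none

theorem pyGetKey_isSome_of_mem {α : Type} (l : List (String × α)) (k : String)
    (hm : k ∈ l.map Prod.fst) : (pyGetKey l k).isSome := by
  induction l with
  | nil => cases hm
  | cons hd tl ih =>
    obtain ⟨k', v'⟩ := hd
    simp only [List.map_cons, List.mem_cons] at hm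
    by_cases he : k' = k
    · simp [pyGetKey, he]
    · rcases hm with h | h
      · exact absurd h.symm he
      · simp only [pyGetKey, beq_iff_eq, if_neg he]
        exact ih h

theorem pyGetKey_of_nodup {α : Type} (l : List (String × α)) (k : String) (v : α)
    (hnd : (l.map Prod.fst).Nodup) (hm : (k, v) ∈ l) : pyGetKey l k = some v := by
  induction l with
  | nil => cases hm
  | cons hd tl ih =>
    obtain ⟨k', v'⟩ := hd
    simp only [List.map_cons, List.nodup_cons] at hnd
    rcases List.mem_cons.mp hm with h | h
    · obtain ⟨h1, h2⟩ := Prod.mk.inj h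
      subst h1; subst h2
      simp [pyGetKey]
    · have hk : k ∈ tl.map Prod.fst := List.mem_map.mpr ⟨(k, v), h, rfl⟩
      have hne : k' ≠ k := fun he => hnd.1 (by rw [he]; exact hk)
      simp only [pyGetKey, beq_iff_eq, if_neg hne]
      exact ih hnd.2 h

theorem pyALoop_eq_scanSec (rva : Int) (l : List (String × List (String × Int)))
    (hnd : (l.map Prod.fst).Nodup) :
    ∀ post pre, l = pre ++ post → pyALoop rva l (post.map Prod.fst) = scanSec rva post := by
  intro post
  induction post with
  | nil => intro pre _; simp [pyALoop, scanSec]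
  | cons hd tl ih =>
    intro pre heq
    obtain ⟨s, sec⟩ := hd
    have hmem : (s, sec) ∈ l := by rw [heq]; simp
    have hget : pyGetKey l s = some sec := pyGetKey_of_nodup l s sec hnd hmem
    simp only [List.map_cons, pyALoop, hget, scanSec]
    cases hva : pyGetKey sec "virtual_address" with
    | none => rfl
    | some v_add =>
      cases hvs : pyGetKey sec "virtual_size" with
      | none => rfl
      | some v_size =>
        simp only [ge_iff_le]
        by_cases hc : v_add ≤ rva ∧ rva < v_add + v_size
        · simp only [if_pos hc]
          cases pyGetKey sec "pointer_to_raw_data" <;> rfl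
        · simp only [if_neg hc]
          exact ih (pre ++ [(s, sec)]) (by simp [heq])

theorem pyBLoop_eq (rva : Int) (adj fallback : Option Int)
    (l : List (String × List (String × Int))) (hsec : ∀ p ∈ l, secOK p.2) :
    pyBLoop rva adj fallback l
      = ((scanSec rva l).or (fallback.or (adj.bind (fun a => scanSec a l)))) := by
  induction l generalizing fallback with
  | nil => cases fallback <;> cases adj <;> simp [pyBLoop, scanSec]
  | cons hd tl ih =>
    obtain ⟨s, sec⟩ := hd
    have hok : secOK sec := hsec (s, sec) (List.mem_cons_self ..)
    have htl : ∀ p ∈ tl, secOK p.2 := fun p hp => hsec p (List.mem_cons_of_mem _ hp)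
    obtain ⟨v_add, hva⟩ := Option.isSome_iff_exists.mp (pyGetKey_isSome_of_mem sec _ hok.1)
    obtain ⟨v_size, hvs⟩ := Option.isSome_iff_exists.mp (pyGetKey_isSome_of_mem sec _ hok.2.1)
    obtain ⟨ptr, hp⟩ := Option.isSome_iff_exists.mp (pyGetKey_isSome_of_mem sec _ hok.2.2)
    simp only [pyBLoop, scanSec, hva, hvs, hp]
    by_cases hc : v_add ≤ rva ∧ rva < v_add + v_size
    · simp [if_pos hc]
    · simp only [if_neg hc]
      cases fallback with
      | some f => simp [ih _ htl]
      | none =>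
        cases adj with
        | none => simp [ih _ htl]
        | some a =>
          by_cases ha : v_add ≤ a ∧ a < v_add + v_size
          · simp [if_pos ha, ih _ htl]
          · simp [if_neg ha, ih _ htl]

theorem alt_eq_scan (rva : Int) (l : List (String × List (String × Int))) (image_base : Int)
    (hsec : ∀ p ∈ l, secOK p.2) :
    rva_to_offset_alt rva l image_base
      = ((scanSec rva l).or
          (if image_base ≠ 0 ∧ rva > image_base then scanSec (rva - image_base) l else none)) := by
  unfold rva_to_offset_alt
  rw [pyBLoop_eq rva _ none l hsec]
  by_cases h : image_base ≠ 0 ∧ rva > image_base <;> simp [h]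

-- ===== VERDICT (by name: the statement is the Claim_ definition above) =====
theorem rva_to_offset_spec : Claim_equal_rva_to_offset := by
  intro rva sections image_base _ hpre
  obtain ⟨hnd, hsec'⟩ := hpre
  have hsec : ∀ p ∈ sections, secOK p.2 := fun p hp => (hsec' p hp).2
  unfold Spec_rva_to_offset
  rw [alt_eq_scan rva sections image_base hsec]
  cases hE : decide (sections = []) with
  | true =>
    have he : sections = [] := of_decide_eq_true hE
    subst he
    simp [rva_to_offset, scanSec]
  | false =>
    have hne : sections ≠ [] := of_decide_eq_false hE
    have hA : pyALoop rva sections (sections.map Prod.fst) = scanSec rva sections :=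
      pyALoop_eq_scanSec rva sections hnd sections [] rfl
    rw [rva_to_offset, if_neg hne, hA]
    cases h1 : scanSec rva sections with
    | some f => simp [Option.or]
    | none =>
      simp only [Option.none_or]
      by_cases hib : image_base ≠ 0 ∧ rva > image_base
      · rw [dif_pos hib, if_pos hib]
        have hA2 : pyALoop (rva - image_base) sections (sections.map Prod.fst)
            = scanSec (rva - image_base) sections :=
          pyALoop_eq_scanSec (rva - image_base) sections hnd sections [] rfl
        rw [rva_to_offset, if_neg hne, hA2]
        cases scanSec (rva - image_base) sections <;> simp
      · rw [dif_neg hib, if_neg hib]
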